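-- pv_equiv track=rewrite | github.com/Uzma1602/streak_module | mindapp/serializers.py | process_false_after_frozen_true
-- ===== SOURCE A (Python) =====
-- def process_false_after_frozen_true(date_dict):
--     processed_dict = date_dict.copy()
--     encountered_frozen_true = False
--
--     for day, status in date_dict.items():
--         if status == "Frozen_True":
--             encountered_frozen_true = True
--         elif status == "False" and encountered_frozen_true:
--             processed_dict = process_black_falses(processed_dict)
--             break  # Stop processing when a "False" after "Frozen_True" is encountered
--
--     return processed_dict
--
-- def process_black_falses(date_dict):
--     processed_dict = date_dict.copy()
--
--     for day, status in date_dict.items():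
--         if status == "Frozen_True":
--             break  # Stop processing when a "Frozen_True" is encountered
--         elif status == "False":
--             processed_dict[day] = "BlackFalse"
--     return processed_dict
-- ===== SOURCE B (Python) =====
-- def process_false_after_frozen_true(date_dict):
--     seen_frozen = False
--     leading_false_keys = []
--     trigger = False
--     for day, status in date_dict.items():
--         if not seen_frozen:
--             if status == "Frozen_True":
--                 seen_frozen = True
--             elif status == "False":
--                 leading_false_keys.append(day)
--         elif status == "False":
--             trigger = True
--             break
--     out = date_dict.copy()
--     if trigger:
--         for day in leading_false_keys:
--             out[day] = "BlackFalse"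
--     return out
-- ===== Notes on version B (the rewrite author's own statement) =====
-- stated objective: alternative
-- what changed: Single traversal that gathers the leading-false keys and the after-frozen trigger together, then applies the rewrite once at the end, replacing A's detect-pass plus restarted helper scan.
import Mathlib
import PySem

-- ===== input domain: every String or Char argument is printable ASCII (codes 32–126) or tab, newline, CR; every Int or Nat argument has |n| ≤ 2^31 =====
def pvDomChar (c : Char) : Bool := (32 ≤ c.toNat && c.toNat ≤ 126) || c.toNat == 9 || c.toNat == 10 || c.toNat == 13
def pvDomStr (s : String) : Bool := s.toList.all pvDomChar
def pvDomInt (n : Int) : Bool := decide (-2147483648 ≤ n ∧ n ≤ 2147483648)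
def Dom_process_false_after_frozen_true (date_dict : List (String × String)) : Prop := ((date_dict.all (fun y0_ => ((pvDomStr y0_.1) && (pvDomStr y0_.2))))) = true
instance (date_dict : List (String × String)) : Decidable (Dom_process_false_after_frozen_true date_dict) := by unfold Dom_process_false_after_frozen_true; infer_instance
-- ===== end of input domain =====

-- B does the same rewrite in one gathering pass instead of A's detect-pass plus restarted helper scan (alternative decomposition, same cost).

-- ===== PORT A =====
-- d[k] = v on an insertion-ordered dict given as its association list (exact Python semantics)
def dinsert (xs : List (String × String)) (k v : String) : List (String × String) :=
  ((PySem.Dict.mk xs).insert k v).items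

-- helper process_black_falses: loop over the items, stop at the first "Frozen_True",
-- overwrite each "False" key with "BlackFalse" in the accumulated dict.
def pbfLoop : List (String × String) → List (String × String) → List (String × String)
  | [], proc => proc
  | (day, status) :: rest, proc =>
    if status = "Frozen_True" then proc
    else if status = "False" then pbfLoop rest (dinsert proc day "BlackFalse")
    else pbfLoop rest proc

def process_black_falses (date_dict : List (String × String)) : List (String × String) :=
  pbfLoop date_dict date_dict

-- main loop of A: scan for a "False" after a "Frozen_True"; on the first one,
-- rewrite via process_black_falses and break.
def aLoop : List (String × String) → Bool → List (String × String) → List (String × String)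
  | [], _, proc => proc
  | (_, status) :: rest, enc, proc =>
    if status = "Frozen_True" then aLoop rest true proc
    else if status = "False" ∧ enc = true then process_black_falses proc
    else aLoop rest enc proc

def process_false_after_frozen_true (date_dict : List (String × String)) : List (String × String) :=
  aLoop date_dict false date_dict

-- ===== PORT B =====
-- one pass gathering the leading-false keys and the trigger together
def bGather : List (String × String) → Bool → List String → (List String × Bool)
  | [], _, leading => (leading, false)
  | (day, status) :: rest, seen, leading =>
    if seen = false then
      if status = "Frozen_True" then bGather rest true leading
      else if status = "False" then bGather rest seen (leading ++ [day])
      else bGather rest seen leading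
    else if status = "False" then (leading, true)
    else bGather rest seen leading

def process_false_after_frozen_true_alt (date_dict : List (String × String)) : List (String × String) :=
  let r := bGather date_dict false []
  if r.2 then r.1.foldl (fun out day => dinsert out day "BlackFalse") date_dict
  else date_dict

-- ===== PRECONDITION & SPEC =====
def Spec_process_false_after_frozen_true (date_dict : List (String × String)) (out : List (String × String)) : Prop := out = process_false_after_frozen_true_alt date_dict
instance (date_dict : List (String × String)) (out : List (String × String)) : Decidable (Spec_process_false_after_frozen_true date_dict out) := by unfold Spec_process_false_after_frozen_true; infer_instance

-- ===== CLAIM (what is proved, stated in full; the proofs are below) =====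
def Claim_equal_process_false_after_frozen_true : Prop := ∀ (date_dict : List (String × String)), Dom_process_false_after_frozen_true date_dict → Spec_process_false_after_frozen_true date_dict (process_false_after_frozen_true date_dict)

-- ===== LEMMAS AND PROOFS =====

-- the "False" keys occurring before the first "Frozen_True"
def fkeys : List (String × String) → List String
  | [] => []
  | (day, status) :: rest =>
    if status = "Frozen_True" then []
    else if status = "False" then day :: fkeys rest
    else fkeys rest

-- whether some "Frozen_True" is followed (strictly later) by some "False"
def trig : List (String × String) → Bool
  | [] => false
  | (_, status) :: rest =>
    if status = "Frozen_True" then rest.any (fun p => p.2 = "False") else trig rest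

theorem pbfLoop_eq_foldl (xs proc : List (String × String)) :
    pbfLoop xs proc = (fkeys xs).foldl (fun out day => dinsert out day "BlackFalse") proc := by
  induction xs generalizing proc with
  | nil => simp [pbfLoop, fkeys]
  | cons p rest ih =>
    obtain ⟨day, status⟩ := p
    by_cases h1 : status = "Frozen_True" <;> by_cases h2 : status = "False" <;>
      simp [pbfLoop, fkeys, h1, h2, ih]

theorem aLoop_true (xs proc : List (String × String)) :
    aLoop xs true proc =
      if xs.any (fun p => p.2 = "False") then process_black_falses proc else proc := by
  induction xs with
  | nil => simp [aLoop]
  | cons p rest ih =>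
    obtain ⟨day, status⟩ := p
    by_cases h1 : status = "Frozen_True"
    · subst h1
      simp [aLoop, List.any_cons, ih]
      simp only [show (decide (("Frozen_True" : String) = "False")) = false from rfl, Bool.false_or]
    · by_cases h2 : status = "False"
      · subst h2; simp [aLoop, List.any_cons]
      · simp [aLoop, List.any_cons, h1, h2, ih]
        simp only [decide_eq_false h2, Bool.false_or]

theorem aLoop_false (xs proc : List (String × String)) :
    aLoop xs false proc = if trig xs then process_black_falses proc else proc := by
  induction xs with
  | nil => simp [aLoop, trig]
  | cons p rest ih =>
    obtain ⟨day, status⟩ := p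
    by_cases h1 : status = "Frozen_True"
    · subst h1; simp [aLoop, trig, aLoop_true]
    · simp [aLoop, trig, h1, ih]

theorem bGather_true (xs : List (String × String)) (acc : List String) :
    bGather xs true acc = (acc, xs.any (fun p => p.2 = "False")) := by
  induction xs with
  | nil => simp [bGather]
  | cons p rest ih =>
    obtain ⟨day, status⟩ := p
    by_cases h2 : status = "False" <;> simp [bGather, List.any_cons, h2, ih]

theorem bGather_false (xs : List (String × String)) (acc : List String) :
    bGather xs false acc = (acc ++ fkeys xs, trig xs) := by
  induction xs generalizing acc with
  | nil => simp [bGather, fkeys, trig]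
  | cons p rest ih =>
    obtain ⟨day, status⟩ := p
    by_cases h1 : status = "Frozen_True" <;> by_cases h2 : status = "False" <;>
      simp [bGather, fkeys, trig, h1, h2, ih, bGather_true]

-- ===== VERDICT (by name: the statement is the Claim_ definition above) =====
theorem process_false_after_frozen_true_spec : Claim_equal_process_false_after_frozen_true := by
  intro d _
  show process_false_after_frozen_true d = process_false_after_frozen_true_alt d
  simp only [process_false_after_frozen_true, process_false_after_frozen_true_alt,
    aLoop_false, bGather_false, List.nil_append, process_black_falses, pbfLoop_eq_foldl]
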